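-- pv_equiv track=rewrite | github.com/seopchan/CodingTest | 프로그래머스/1/76501. 음양 더하기/음양 더하기.py | solution
-- ===== SOURCE A (Python) =====
-- def solution(absolutes, signs):
--     sum_val = 0
--     for n, sign in zip(absolutes, signs):
--         if sign:
--             sum_val += n
--         else:
--             sum_val -= n
--
--     return sum_val
-- ===== SOURCE B (Python) =====
-- def solution(absolutes, signs):
--     total = sum(a for a, _ in zip(absolutes, signs))
--     neg = sum(a for a, s in zip(absolutes, signs) if not s)
--     return total - 2 * neg
-- ===== Notes on version B (the rewrite author's own statement) =====
-- stated objective: alternative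
-- what changed: Replaces the single branching accumulation loop with two unconditional zip-prefix sums (total and negative part) combined by the correction formula total - 2*neg.
import Mathlib
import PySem

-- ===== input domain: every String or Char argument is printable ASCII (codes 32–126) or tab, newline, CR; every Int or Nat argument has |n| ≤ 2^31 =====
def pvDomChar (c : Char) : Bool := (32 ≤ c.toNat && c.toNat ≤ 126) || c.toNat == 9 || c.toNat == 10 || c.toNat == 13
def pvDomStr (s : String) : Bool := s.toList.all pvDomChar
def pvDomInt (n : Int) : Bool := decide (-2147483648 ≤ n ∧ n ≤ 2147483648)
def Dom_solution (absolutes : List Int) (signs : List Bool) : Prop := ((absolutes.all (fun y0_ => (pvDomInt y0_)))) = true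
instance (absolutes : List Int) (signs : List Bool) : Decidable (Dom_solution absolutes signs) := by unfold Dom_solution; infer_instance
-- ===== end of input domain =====

-- B replaces A's single branching accumulation with two unconditional zip-prefix sums combined by total - 2*neg (alternative decomposition, same cost).

-- ===== PORT A =====
-- for n, sign in zip(absolutes, signs): if sign: sum_val += n else: sum_val -= n
def solution (absolutes : List Int) (signs : List Bool) : Int :=
  (absolutes.zip signs).foldl (fun sum_val p => if p.2 then sum_val + p.1 else sum_val - p.1) 0

-- ===== PORT B =====
-- total = sum over zip; neg = sum over zip where sign is false; total - 2*neg
def solution_alt (absolutes : List Int) (signs : List Bool) : Int :=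
  let total := ((absolutes.zip signs).map (fun p => p.1)).sum
  let neg := (((absolutes.zip signs).filter (fun p => !p.2)).map (fun p => p.1)).sum
  total - 2 * neg

-- ===== PRECONDITION & SPEC =====
def Spec_solution (absolutes : List Int) (signs : List Bool) (out : Int) : Prop := out = solution_alt absolutes signs
instance (absolutes : List Int) (signs : List Bool) (out : Int) : Decidable (Spec_solution absolutes signs out) := by unfold Spec_solution; infer_instance

-- ===== CLAIM (what is proved, stated in full; the proofs are below) =====
def Claim_equal_solution : Prop := ∀ (absolutes : List Int) (signs : List Bool), Dom_solution absolutes signs → Spec_solution absolutes signs (solution absolutes signs)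

-- ===== LEMMAS AND PROOFS =====
lemma foldl_signed (l : List (Int × Bool)) (acc : Int) :
    l.foldl (fun sum_val p => if p.2 then sum_val + p.1 else sum_val - p.1) acc =
      acc + ((l.map (fun p => p.1)).sum - 2 * (((l.filter (fun p => !p.2)).map (fun p => p.1)).sum)) := by
  induction l generalizing acc with
  | nil => simp
  | cons h t ih =>
    cases hb : h.2 <;> simp [List.foldl, List.filter, hb, ih] <;> ring

-- ===== VERDICT (by name: the statement is the Claim_ definition above) =====
theorem solution_spec : Claim_equal_solution := by
  intro absolutes signs _
  show _ = _
  simp [solution, solution_alt, foldl_signed]
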